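-- pv_equiv track=rewrite | github.com/darko1002001/advent-of-code-23 | code/day_14/part_1.py | score_column
-- ===== SOURCE A (Python) =====
-- def score_column(col):
--     total = len(col)
--     position = 0
--     l = []
--     for index, ch in enumerate(col):
--         multiplier = total - position
--         if ch == "O":
--             l.append(multiplier)
--             position += 1
--         elif ch == "#":
--             position = index + 1
--     return sum(l)
-- ===== SOURCE B (Python) =====
-- def score_column(col):
--     # Per-segment closed form: between walls '#', c rocks pack into slots
--     # offset, offset+1, ... so they contribute the arithmetic series
--     # c*(total-offset) - c*(c-1)//2; flush a segment at each wall.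
--     total = len(col)
--     out = 0
--     offset = 0   # index where the current segment starts
--     c = 0        # number of 'O' rocks in the current segment
--     for index, ch in enumerate(col):
--         if ch == "O":
--             c += 1
--         elif ch == "#":
--             out += c * (total - offset) - c * (c - 1) // 2
--             c = 0
--             offset = index + 1
--     return out + c * (total - offset) - c * (c - 1) // 2
-- ===== Notes on version B (the rewrite author's own statement) =====
-- stated objective: alternative
-- what changed: A appends one multiplier per rock into a list (decrementing a per-rock position counter) and sums the list; B never builds a per-rock list: it counts the rocks of each '#'-delimited segment and adds that segment's score in one closed-form arithmetic-series expression c*(total-offset) - c*(c-1)//2.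
import Mathlib
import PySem

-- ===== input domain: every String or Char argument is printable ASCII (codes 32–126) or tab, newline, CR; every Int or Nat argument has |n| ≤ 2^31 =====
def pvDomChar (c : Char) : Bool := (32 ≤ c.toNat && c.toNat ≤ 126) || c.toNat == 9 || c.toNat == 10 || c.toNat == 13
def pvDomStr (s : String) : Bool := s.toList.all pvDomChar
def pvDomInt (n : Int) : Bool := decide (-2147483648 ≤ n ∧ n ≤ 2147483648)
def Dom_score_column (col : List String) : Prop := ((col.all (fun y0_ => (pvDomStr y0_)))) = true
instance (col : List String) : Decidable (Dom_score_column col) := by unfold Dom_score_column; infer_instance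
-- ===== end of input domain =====

-- B replaces A's per-rock multiplier list by a per-'#'-segment closed-form arithmetic series (alternative decomposition, same cost).

-- ===== PORT A =====
-- loop body of A: state = (position, l)
def stepA (total : Int) (st : Int × List Int) (ie : Int × String) : Int × List Int :=
  let multiplier := total - st.1
  if ie.2 = "O" then (st.1 + 1, st.2 ++ [multiplier])
  else if ie.2 = "#" then (ie.1 + 1, st.2)
  else st

def score_column (col : List String) : Int :=
  let total : Int := col.length
  (((PySem.List.enumerate col).foldl (stepA total) (0, [])).2).sum

-- ===== PORT B =====
-- B-side helper: score of one segment of c rocks whose top slot is `offset` (the expression Source B writes twice)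
def serB (total offset c : Int) : Int :=
  c * (total - offset) - PySem.Int.floordiv (c * (c - 1)) 2

-- loop body of B: state = (out, offset, c)
def stepB (total : Int) (st : Int × Int × Int) (ie : Int × String) : Int × Int × Int :=
  if ie.2 = "O" then (st.1, st.2.1, st.2.2 + 1)
  else if ie.2 = "#" then (st.1 + serB total st.2.1 st.2.2, ie.1 + 1, 0)
  else st

def score_column_alt (col : List String) : Int :=
  let total : Int := col.length
  let st := (PySem.List.enumerate col).foldl (stepB total) (0, 0, 0)
  st.1 + serB total st.2.1 st.2.2

-- ===== PRECONDITION & SPEC =====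
def Spec_score_column (col : List String) (out : Int) : Prop := out = score_column_alt col
instance (col : List String) (out : Int) : Decidable (Spec_score_column col out) := by unfold Spec_score_column; infer_instance

-- ===== CLAIM (what is proved, stated in full; the proofs are below) =====
def Claim_equal_score_column : Prop := ∀ (col : List String), Dom_score_column col → Spec_score_column col (score_column col)

-- ===== LEMMAS AND PROOFS =====
lemma serB_zero (T o : Int) : serB T o 0 = 0 := by
  unfold serB
  rw [PySem.Int.floordiv_eq_ediv_of_pos (by norm_num)]
  norm_num

lemma serB_succ (T o c : Int) : serB T o (c + 1) = serB T o c + (T - o - c) := by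
  unfold serB
  rw [PySem.Int.floordiv_eq_ediv_of_pos (by norm_num),
      PySem.Int.floordiv_eq_ediv_of_pos (by norm_num)]
  have h : (c + 1) * ((c + 1) - 1) = c * (c - 1) + c * 2 := by ring
  rw [h, Int.add_mul_ediv_right _ _ (by norm_num : (2:Int) ≠ 0)]
  ring

lemma mainLemma (T : Int) (xs : List String) : ∀ (s offset c out : Int) (l : List Int),
    ((PySem.List.enumerate xs s).foldl (stepA T) (offset + c, l)).2.sum
      = l.sum - out - serB T offset c
        + ((PySem.List.enumerate xs s).foldl (stepB T) (out, offset, c)).1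
        + serB T (((PySem.List.enumerate xs s).foldl (stepB T) (out, offset, c)).2.1)
                 (((PySem.List.enumerate xs s).foldl (stepB T) (out, offset, c)).2.2) := by
  induction xs with
  | nil =>
    intro s o c out l
    simp [PySem.List.enumerate_nil]
    ring
  | cons ch rest ih =>
    intro s o c out l
    rw [PySem.List.enumerate_cons]
    simp only [List.foldl_cons]
    by_cases hO : ch = "O"
    · simp only [stepA, stepB, hO, String.reduceEq, reduceIte]
      have h := ih (s + 1) o (c + 1) out (l ++ [T - (o + c)])
      rw [show o + (c + 1) = o + c + 1 from by ring] at h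
      rw [h, List.sum_append, serB_succ]
      simp
      ring
    · by_cases hH : ch = "#"
      · simp only [stepA, stepB, hH, String.reduceEq, reduceIte]
        have h := ih (s + 1) (s + 1) 0 (out + serB T o c) l
        rw [show (s + 1) + (0:Int) = s + 1 from by ring] at h
        rw [h, serB_zero]
        ring_nf
      · simp only [stepA, stepB, hO, hH, reduceIte]
        exact ih (s + 1) o c out l

-- ===== VERDICT (by name: the statement is the Claim_ definition above) =====
theorem score_column_spec : Claim_equal_score_column := by
  unfold Claim_equal_score_column
  intro col _
  unfold Spec_score_column score_column score_column_alt
  have h := mainLemma (col.length) col 0 0 0 0 []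
  simpa [serB_zero] using h
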